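-- pv_equiv track=rewrite | github.com/shubro18202758/Indian_Military_Scheduling_System | backend/app/services/tracking_service.py | _calculate_threat_level
-- ===== SOURCE A (Python) =====
-- from typing import Dict, List, Optional, Any, Tuple
--
-- def _calculate_threat_level(threats: List[Dict]) -> str:
--     """Calculate overall threat level."""
--     if not threats:
--         return "LOW"
--
--     severities = [t.get("severity", "LOW") for t in threats]
--     if "HIGH" in severities or "CRITICAL" in severities:
--         return "HIGH"
--     elif "MEDIUM" in severities:
--         return "MEDIUM"
--     else:
--         return "LOW"
-- ===== SOURCE B (Python) =====
-- def _calculate_threat_level(threats):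
--     """Calculate overall threat level (single pass, running max rank)."""
--     rank = {"CRITICAL": 2, "HIGH": 2, "MEDIUM": 1}
--     m = 0
--     for t in threats:
--         m = max(m, rank.get(t.get("severity", "LOW"), 0))
--     return "HIGH" if m == 2 else ("MEDIUM" if m == 1 else "LOW")
-- ===== Notes on version B (the rewrite author's own statement) =====
-- stated objective: simpler
-- what changed: Replaces the severities-list build plus ordered membership checks with a single pass keeping a running maximum severity rank, mapped back to a label at the end (empty list yields rank 0 = LOW naturally).
import Mathlib
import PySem

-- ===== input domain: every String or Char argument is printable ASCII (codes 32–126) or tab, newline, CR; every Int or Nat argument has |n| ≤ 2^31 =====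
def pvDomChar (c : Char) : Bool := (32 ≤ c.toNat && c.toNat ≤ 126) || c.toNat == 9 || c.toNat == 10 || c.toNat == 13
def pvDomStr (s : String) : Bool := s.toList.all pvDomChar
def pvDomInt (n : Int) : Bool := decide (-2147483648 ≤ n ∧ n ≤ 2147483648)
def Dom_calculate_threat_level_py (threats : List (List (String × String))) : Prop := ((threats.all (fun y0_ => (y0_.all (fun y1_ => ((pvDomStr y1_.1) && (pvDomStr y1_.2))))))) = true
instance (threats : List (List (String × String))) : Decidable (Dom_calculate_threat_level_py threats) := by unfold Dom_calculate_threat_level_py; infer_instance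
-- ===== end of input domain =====

-- B replaces A's severities list + ordered membership checks by one pass keeping a running
-- maximum severity rank (objective: simpler). Equivalence is exact on all inputs.

-- shared accessor: Python's t.get("severity", "LOW")
def pvSev (t : List (String × String)) : String :=
  (PySem.Dict.mk t).getD "severity" "LOW"

-- ===== PORT A =====
def calculate_threat_level_py (threats : List (List (String × String))) : String :=
  if threats = [] then "LOW"
  else
    let severities := threats.map (fun t => pvSev t)
    if severities.contains "HIGH" || severities.contains "CRITICAL" then "HIGH"
    else if severities.contains "MEDIUM" then "MEDIUM"
    else "LOW"

-- ===== PORT B =====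
-- B's literal dict rank = {"CRITICAL": 2, "HIGH": 2, "MEDIUM": 1}; rank.get(s, 0):
def pvRank (s : String) : Nat :=
  if s == "CRITICAL" then 2 else if s == "HIGH" then 2 else if s == "MEDIUM" then 1 else 0

def calculate_threat_level_py_alt (threats : List (List (String × String))) : String :=
  let m := threats.foldl (fun m t => max m (pvRank (pvSev t))) 0
  if m = 2 then "HIGH" else if m = 1 then "MEDIUM" else "LOW"

-- ===== PRECONDITION & SPEC =====
def Spec_calculate_threat_level_py (threats : List (List (String × String))) (out : String) : Prop := out = calculate_threat_level_py_alt threats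
instance (threats : List (List (String × String))) (out : String) : Decidable (Spec_calculate_threat_level_py threats out) := by unfold Spec_calculate_threat_level_py; infer_instance

-- ===== CLAIM (what is proved, stated in full; the proofs are below) =====
def Claim_equal_calculate_threat_level_py : Prop := ∀ (threats : List (List (String × String))), Dom_calculate_threat_level_py threats → Spec_calculate_threat_level_py threats (calculate_threat_level_py threats)

-- ===== LEMMAS AND PROOFS =====

def pvM (ts : List (List (String × String))) : Nat :=
  ts.foldl (fun m t => max m (pvRank (pvSev t))) 0

lemma pvM_shift (ts : List (List (String × String))) (m : Nat) :
    ts.foldl (fun a t => max a (pvRank (pvSev t))) m = max m (pvM ts) := by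
  induction ts generalizing m with
  | nil => simp [pvM]
  | cons t ts ih =>
    simp only [pvM, List.foldl_cons] at *
    rw [ih, ih (max 0 _)]
    omega

lemma pvM_cons (t : List (String × String)) (ts : List (List (String × String))) :
    pvM (t :: ts) = max (pvRank (pvSev t)) (pvM ts) := by
  simp only [pvM, List.foldl_cons, Nat.zero_max]
  exact pvM_shift ts _

lemma pvRank_le (s : String) : pvRank s ≤ 2 := by
  unfold pvRank; split_ifs <;> omega

lemma pvM_le (ts : List (List (String × String))) : pvM ts ≤ 2 := by
  induction ts with
  | nil => simp [pvM]
  | cons t ts ih => rw [pvM_cons]; have := pvRank_le (pvSev t); omega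

lemma pvM2_iff (ts : List (List (String × String))) :
    pvM ts = 2 ↔ ∃ t ∈ ts, pvRank (pvSev t) = 2 := by
  induction ts with
  | nil => simp [pvM]
  | cons t ts ih =>
    rw [pvM_cons]
    simp only [List.mem_cons, exists_eq_or_imp, ← ih]
    have := pvRank_le (pvSev t); have := pvM_le ts
    omega

lemma pvM1_iff (ts : List (List (String × String))) :
    1 ≤ pvM ts ↔ ∃ t ∈ ts, 1 ≤ pvRank (pvSev t) := by
  induction ts with
  | nil => simp [pvM]
  | cons t ts ih =>
    rw [pvM_cons]
    simp only [List.mem_cons, exists_eq_or_imp, ← ih]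
    omega

lemma pvRank2_iff (s : String) : pvRank s = 2 ↔ s = "HIGH" ∨ s = "CRITICAL" := by
  unfold pvRank
  split_ifs with h1 h2 h3 <;> simp_all

lemma pvRank1_iff (s : String) :
    1 ≤ pvRank s ↔ s = "HIGH" ∨ s = "CRITICAL" ∨ s = "MEDIUM" := by
  unfold pvRank
  split_ifs with h1 h2 h3 <;> simp_all

-- ===== VERDICT (by name: the statement is the Claim_ definition above) =====
theorem calculate_threat_level_py_spec : Claim_equal_calculate_threat_level_py := by
  intro ts _
  unfold Spec_calculate_threat_level_py calculate_threat_level_py calculate_threat_level_py_alt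
  rw [show ts.foldl (fun m t => max m (pvRank (pvSev t))) 0 = pvM ts from rfl]
  by_cases hne : ts = []
  · simp [hne, pvM]
  · have hle := pvM_le ts
    have e2 : pvM ts = 2 ↔ (∃ t ∈ ts, pvSev t = "HIGH") ∨ (∃ t ∈ ts, pvSev t = "CRITICAL") := by
      rw [pvM2_iff]
      constructor
      · rintro ⟨t, ht, hr⟩
        rcases (pvRank2_iff _).mp hr with h | h
        · exact Or.inl ⟨t, ht, h⟩
        · exact Or.inr ⟨t, ht, h⟩
      · rintro (⟨t, ht, h⟩ | ⟨t, ht, h⟩) <;> exact ⟨t, ht, (pvRank2_iff _).mpr (by simp [h])⟩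
    have e1 : 1 ≤ pvM ts ↔ (∃ t ∈ ts, pvSev t = "HIGH") ∨ (∃ t ∈ ts, pvSev t = "CRITICAL") ∨ (∃ t ∈ ts, pvSev t = "MEDIUM") := by
      rw [pvM1_iff]
      constructor
      · rintro ⟨t, ht, hr⟩
        rcases (pvRank1_iff _).mp hr with h | h | h
        · exact Or.inl ⟨t, ht, h⟩
        · exact Or.inr (Or.inl ⟨t, ht, h⟩)
        · exact Or.inr (Or.inr ⟨t, ht, h⟩)
      · rintro (⟨t, ht, h⟩ | ⟨t, ht, h⟩ | ⟨t, ht, h⟩) <;>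
          exact ⟨t, ht, (pvRank1_iff _).mpr (by simp [h])⟩
    by_cases h2 : (∃ t ∈ ts, pvSev t = "HIGH") ∨ (∃ t ∈ ts, pvSev t = "CRITICAL")
    · have hm : pvM ts = 2 := e2.mpr h2
      rcases h2 with h | h <;> simp [hne, hm, h]
    · have hn2 : pvM ts ≠ 2 := fun hx => h2 (e2.mp hx)
      rw [not_or] at h2
      obtain ⟨hH, hC⟩ := h2
      by_cases hM : ∃ t ∈ ts, pvSev t = "MEDIUM"
      · have hm : pvM ts = 1 := by
          have := e1.mpr (Or.inr (Or.inr hM))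
          omega
        simp [hne, hm, hH, hC, hM]
      · have hm : pvM ts = 0 := by
          have h1' : ¬ 1 ≤ pvM ts := fun hx => by
            rcases e1.mp hx with h | h | h
            · exact hH h
            · exact hC h
            · exact hM h
          omega
        simp [hne, hm, hH, hC, hM]
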